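-- pv_equiv track=rewrite | github.com/algoritmiaUS/cp-problems | Codeforces/2025A.py | solve
-- ===== SOURCE A (Python) =====
-- def condicion(s: str, t: str, mid: int) -> bool:
--     for k in range(len(s) + 1):  # Probar cada posible longitud de prefijo de s
--         # Encontrar el mayor prefijo común entre s[:k] y t
--         m = 0
--         while m < len(t) and m < k and s[m] == t[m]:
--             m += 1
--
--         # Calcular el tiempo total:
--         # 1. Escribir los primeros k caracteres de s
--         # 2. Copiar esos k caracteres a la otra pantalla
--         # 3. Escribir el resto de s y t
--         total = k + 1 + (len(s) - k) + (len(t) - m)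
--
--         if total <= mid:
--             return True
--     return False
--
-- def solve(s:str,t:str) -> int:
--     left, right = max(len(s), len(t)), 2*(len(s)+len(t))
--
--     while left < right:
--         # Tiempo que tardan las dos secuencias
--         mid = (left+right) // 2
--
--         # Si es posible completar las dos secuencias en mid segundos
--         # Se intenta buscar un menor tiempo
--         if condicion(s, t, mid):
--             right = mid
--         else:
--             left = mid + 1
--
--     # A veces puede ser que escribir cada pantalla uno por uno sea más rápido
--     tt = len(s) + len(t)
--     return left if tt > left else tt
-- ===== SOURCE B (Python) =====
-- def solve(s: str, t: str) -> int:
--     # Closed form: with a common prefix of length lcp, the best copy strategy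
--     # costs len(s)+len(t)+1-lcp; never copying costs len(s)+len(t).
--     lcp = 0
--     while lcp < len(s) and lcp < len(t) and s[lcp] == t[lcp]:
--         lcp += 1
--     total = len(s) + len(t)
--     return min(total, total + 1 - lcp)
-- ===== Notes on version B (the rewrite author's own statement) =====
-- stated objective: faster
-- what changed: Replaced the binary search over candidate times (each step rescanning every prefix length k with an inner character loop) by a single common-prefix scan and the closed form min(len(s)+len(t), len(s)+len(t)+1-lcp).
import Mathlib
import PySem

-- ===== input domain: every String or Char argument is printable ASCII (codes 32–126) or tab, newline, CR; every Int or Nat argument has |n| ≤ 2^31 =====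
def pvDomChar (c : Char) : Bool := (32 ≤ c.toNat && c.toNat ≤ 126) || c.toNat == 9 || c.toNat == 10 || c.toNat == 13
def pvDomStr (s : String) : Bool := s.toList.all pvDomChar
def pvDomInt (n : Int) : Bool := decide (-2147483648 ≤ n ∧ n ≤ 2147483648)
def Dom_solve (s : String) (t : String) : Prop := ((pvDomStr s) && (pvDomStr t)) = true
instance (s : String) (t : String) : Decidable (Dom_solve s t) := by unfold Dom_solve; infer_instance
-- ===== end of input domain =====

-- B replaces A's binary search + per-mid prefix rescans by one common-prefix scan
-- and the closed form min(n+m, n+m+1-lcp): asymptotically faster, return value identical.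

-- ===== PORT A =====
-- inner 'while m < len(t) and m < k and s[m] == t[m]: m += 1' of condicion
-- (indices are in range: m < len(t) and m < k ≤ len(s) are checked by the guard, so getD is exact)
def aPrefM (sl tl : List Char) (k : Nat) (m : Nat) : Nat :=
  if m < tl.length ∧ m < k ∧ sl.getD m ' ' = tl.getD m ' ' then aPrefM sl tl k (m + 1) else m
termination_by tl.length - m
decreasing_by omega

-- 'for k in range(len(s)+1): … if total <= mid: return True' of condicion
def condLoop (sl tl : List Char) (mid : Int) : List Nat → Bool
  | [] => false
  | k :: ks =>
    let m := aPrefM sl tl k 0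
    let total : Int := (k : Int) + 1 + ((sl.length : Int) - k) + ((tl.length : Int) - m)
    if total ≤ mid then true else condLoop sl tl mid ks

def condicion (sl tl : List Char) (mid : Int) : Bool :=
  condLoop sl tl mid (List.range (sl.length + 1))

-- the 'while left < right' binary-search loop of solve
def bsLoop (sl tl : List Char) (left right : Int) : Int :=
  if left < right then
    let mid := PySem.Int.floordiv (left + right) 2
    if condicion sl tl mid then bsLoop sl tl left mid else bsLoop sl tl (mid + 1) right
  else left
termination_by (right - left).toNat
decreasing_by
  · have h2 : PySem.Int.floordiv (left + right) 2 < right := by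
      rw [PySem.Int.floordiv_lt_iff_lt_mul (by omega)]; omega
    omega
  · have h1 : left ≤ PySem.Int.floordiv (left + right) 2 := by
      rw [PySem.Int.le_floordiv_iff_mul_le (by omega)]; omega
    omega

def solve (s : String) (t : String) : Int :=
  let sl := s.toList
  let tl := t.toList
  let left : Int := max (sl.length : Int) (tl.length : Int)
  let right : Int := 2 * ((sl.length : Int) + (tl.length : Int))
  let res := bsLoop sl tl left right
  let tt : Int := (sl.length : Int) + (tl.length : Int)
  if tt > res then res else tt

-- ===== PORT B =====
-- 'while lcp < len(s) and lcp < len(t) and s[lcp] == t[lcp]: lcp += 1'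
-- (indices are in range: the guard checks lcp < both lengths, so getD is exact)
def altLcp (sl tl : List Char) (i : Nat) : Nat :=
  if i < sl.length ∧ i < tl.length ∧ sl.getD i ' ' = tl.getD i ' ' then altLcp sl tl (i + 1) else i
termination_by sl.length - i
decreasing_by omega

def solve_alt (s : String) (t : String) : Int :=
  let sl := s.toList
  let tl := t.toList
  let lcp := altLcp sl tl 0
  let total : Int := (sl.length : Int) + (tl.length : Int)
  min total (total + 1 - (lcp : Int))

-- ===== PRECONDITION & SPEC =====
def Spec_solve (s : String) (t : String) (out : Int) : Prop := out = solve_alt s t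
instance (s : String) (t : String) (out : Int) : Decidable (Spec_solve s t out) := by unfold Spec_solve; infer_instance

-- ===== CLAIM (what is proved, stated in full; the proofs are below) =====
def Claim_equal_solve : Prop := ∀ (s : String) (t : String), Dom_solve s t → Spec_solve s t (solve s t)

-- ===== LEMMAS AND PROOFS =====

lemma altLcp_ge (sl tl : List Char) : ∀ m, m ≤ altLcp sl tl m := by
  intro m
  induction m using altLcp.induct sl tl with
  | case1 m h ih => rw [altLcp, if_pos h]; omega
  | case2 m h => rw [altLcp, if_neg h]

lemma altLcp_le (sl tl : List Char) : ∀ m, m ≤ sl.length → m ≤ tl.length →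
    altLcp sl tl m ≤ sl.length ∧ altLcp sl tl m ≤ tl.length := by
  intro m
  induction m using altLcp.induct sl tl with
  | case1 m h ih => intro _ _; rw [altLcp, if_pos h]; exact ih (by omega) (by omega)
  | case2 m h => intro h1 h2; rw [altLcp, if_neg h]; omega

lemma condM_eq (sl tl : List Char) (k : Nat) (hk : k ≤ sl.length) :
    ∀ m, m ≤ k → aPrefM sl tl k m = min k (altLcp sl tl m) := by
  intro m
  induction m using aPrefM.induct sl tl k with
  | case1 m h ih =>
    intro hm
    rw [aPrefM, if_pos h, altLcp, if_pos ⟨by omega, h.1, h.2.2⟩]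
    exact ih (by omega)
  | case2 m h =>
    intro hm
    rw [aPrefM, if_neg h]
    rcases Nat.lt_or_ge m k with hlt | hge
    · rw [altLcp, if_neg (by intro hg; exact h ⟨hg.2.1, hlt, hg.2.2⟩)]
      omega
    · have := altLcp_ge sl tl m
      omega

lemma condLoop_iff (sl tl : List Char) (mid : Int) (ks : List Nat) :
    condLoop sl tl mid ks = true ↔
      ∃ k ∈ ks, (k : Int) + 1 + ((sl.length : Int) - k) + ((tl.length : Int) - aPrefM sl tl k 0) ≤ mid := by
  induction ks with
  | nil => simp [condLoop]
  | cons k ks ih =>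
    rw [condLoop]
    split
    · simp only [true_iff]
      exact ⟨k, List.mem_cons_self, by assumption⟩
    · rw [ih]
      constructor
      · rintro ⟨j, hj, hle⟩; exact ⟨j, List.mem_cons_of_mem _ hj, hle⟩
      · rintro ⟨j, hj, hle⟩
        rcases List.mem_cons.mp hj with rfl | hj
        · omega
        · exact ⟨j, hj, hle⟩

lemma condicion_iff (sl tl : List Char) (mid : Int) :
    condicion sl tl mid = true ↔
      (sl.length : Int) + (tl.length : Int) + 1 - (altLcp sl tl 0 : Int) ≤ mid := by
  obtain ⟨hL1, hL2⟩ := altLcp_le sl tl 0 (by omega) (by omega)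
  rw [condicion, condLoop_iff]
  constructor
  · rintro ⟨k, hk, hle⟩
    have hkle : k ≤ sl.length := by
      have := List.mem_range.mp hk; omega
    rw [condM_eq sl tl k hkle 0 (by omega)] at hle
    have : min k (altLcp sl tl 0) ≤ altLcp sl tl 0 := Nat.min_le_right _ _
    push_cast at hle ⊢
    omega
  · intro h
    refine ⟨sl.length, List.mem_range.mpr (by omega), ?_⟩
    rw [condM_eq sl tl sl.length le_rfl 0 (by omega)]
    have : min sl.length (altLcp sl tl 0) = altLcp sl tl 0 := Nat.min_eq_right hL1
    rw [this]
    push_cast at h ⊢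
    omega

lemma bsLoop_eq (sl tl : List Char) (T : Int)
    (hT : ∀ mid, condicion sl tl mid = true ↔ T ≤ mid) :
    ∀ n : Nat, ∀ left right : Int, (right - left).toNat ≤ n → left ≤ right →
      bsLoop sl tl left right = max left (min right T) := by
  intro n
  induction n with
  | zero =>
    intro left right hn hle
    have : left = right := by omega
    subst this
    rw [bsLoop, if_neg (by omega)]
    omega
  | succ n ih =>
    intro left right hn hle
    by_cases hlr : left < right
    · rw [bsLoop, if_pos hlr]
      have h1 : left ≤ PySem.Int.floordiv (left + right) 2 := by
        rw [PySem.Int.le_floordiv_iff_mul_le (by omega)]; omega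
      have h2 : PySem.Int.floordiv (left + right) 2 < right := by
        rw [PySem.Int.floordiv_lt_iff_lt_mul (by omega)]; omega
      set mid := PySem.Int.floordiv (left + right) 2 with hmid
      by_cases hc : condicion sl tl mid = true
      · rw [if_pos hc]
        have hTm : T ≤ mid := (hT mid).mp hc
        rw [ih left mid (by omega) (by omega)]
        omega
      · rw [if_neg hc]
        have hTm : mid < T := by
          by_contra h
          exact hc ((hT mid).mpr (by omega))
        rw [ih (mid + 1) right (by omega) (by omega)]
        omega
    · rw [bsLoop, if_neg hlr]
      omega

-- ===== VERDICT (by name: the statement is the Claim_ definition above) =====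
theorem solve_spec : Claim_equal_solve := by
  intro s t _
  show solve s t = solve_alt s t
  unfold solve solve_alt
  set sl := s.toList
  set tl := t.toList
  obtain ⟨hL1, hL2⟩ := altLcp_le sl tl 0 (by omega) (by omega)
  set L := altLcp sl tl 0 with hLdef
  have hbs := bsLoop_eq sl tl ((sl.length : Int) + (tl.length : Int) + 1 - (L : Int))
    (fun mid => condicion_iff sl tl mid)
    (2 * ((sl.length : Int) + (tl.length : Int)) - max (sl.length : Int) (tl.length : Int)).toNat
    (max (sl.length : Int) (tl.length : Int))
    (2 * ((sl.length : Int) + (tl.length : Int)))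
    (by omega) (by omega)
  simp only [hbs]
  omega
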